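-- pv_equiv track=rewrite | github.com/magae1/AlgorithmPractice | 백준/Silver II/3085. 사탕 게임/사탕 게임.py | count_candy
-- ===== SOURCE A (Python) =====
-- def count_candy(board, board_size: int, target_x: int, target_y: int, direction: int):
--     max_count = 1
--     recent_candy = ''
--     if direction == 0:
--         count = 1
--         for i in range(board_size):
--             char: str = board[i][target_x]
--             if recent_candy == char:
--                 count += 1
--             else:
--                 recent_candy = char
--                 count = 1
--             max_count = max(max_count, count)
--     else:
--         count = 1
--         for i in range(board_size):
--             char: str = board[target_y][i]
--             if recent_candy == char:
--                 count += 1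
--             else:
--                 recent_candy = char
--                 count = 1
--             max_count = max(max_count, count)
--     return max_count
-- ===== SOURCE B (Python) =====
-- def _max_run(line):
--     best = 1
--     i = 0
--     while i < len(line):
--         j = i + 1
--         while j < len(line) and line[j] == line[i]:
--             j += 1
--         best = max(best, j - i)
--         i = j
--     return best
--
--
-- def count_candy(board, board_size: int, target_x: int, target_y: int, direction: int):
--     if direction == 0:
--         line = [board[i][target_x] for i in range(board_size)]
--     else:
--         line = [board[target_y][i] for i in range(board_size)]
--     return _max_run(line)
-- ===== Notes on version B (the rewrite author's own statement) =====
-- stated objective: simpler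
-- what changed: B first materializes the scanned line and then finds the longest run with a two-pointer run scanner, replacing A's two duplicated per-direction state-machine loops (recent_candy/count/max_count) and their '' sentinel.
-- intended difference: On inputs whose scanned line starts with empty-string candies and contains no candy run longer than that leading run, A's recent_candy='' sentinel matches the first candy and A returns the leading run length plus one (e.g. 2 on board [['']]), while B returns the true longest run length, which is the intended value. — e.g. on count_candy([[""]], 1, 0, 0, 0): A returns 2, B returns 1
import Mathlib
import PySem

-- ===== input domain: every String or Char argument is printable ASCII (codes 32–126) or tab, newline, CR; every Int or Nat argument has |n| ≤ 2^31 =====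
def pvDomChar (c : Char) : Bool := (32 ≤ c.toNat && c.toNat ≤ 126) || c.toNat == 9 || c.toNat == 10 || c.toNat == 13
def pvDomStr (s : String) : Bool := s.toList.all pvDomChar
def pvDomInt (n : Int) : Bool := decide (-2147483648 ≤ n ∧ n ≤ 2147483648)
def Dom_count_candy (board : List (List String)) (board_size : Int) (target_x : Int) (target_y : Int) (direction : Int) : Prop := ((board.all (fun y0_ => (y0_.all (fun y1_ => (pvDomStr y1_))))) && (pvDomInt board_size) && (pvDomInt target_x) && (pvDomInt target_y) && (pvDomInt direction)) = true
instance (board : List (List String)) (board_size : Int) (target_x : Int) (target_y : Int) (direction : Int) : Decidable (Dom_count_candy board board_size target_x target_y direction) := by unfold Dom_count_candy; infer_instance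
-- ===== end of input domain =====

-- B materializes the scanned line and run-scans it with two pointers, instead of A's two
-- duplicated state-machine loops with a '' sentinel; same cost, simpler decomposition.

-- ===== PORT A =====
-- one loop iteration of A: compare char with recent_candy, update (max_count, recent_candy, count)
def pvStep (s : Int × String × Int) (ch : String) : Int × String × Int :=
  if s.2.1 == ch then (max s.1 (s.2.2 + 1), s.2.1, s.2.2 + 1)
  else (max s.1 1, ch, 1)

def count_candy (board : List (List String)) (board_size : Int) (target_x : Int) (target_y : Int) (direction : Int) : Int :=
  if direction = 0 then
    ((PySem.List.pyRange 0 board_size 1).foldl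
      (fun s i => pvStep s (PySem.List.pyGetD (PySem.List.pyGetD board i []) target_x ""))
      ((1 : Int), ("" : String), (1 : Int))).1
  else
    ((PySem.List.pyRange 0 board_size 1).foldl
      (fun s i => pvStep s (PySem.List.pyGetD (PySem.List.pyGetD board target_y []) i ""))
      ((1 : Int), ("" : String), (1 : Int))).1

-- ===== PORT B =====
-- inner while of _max_run: length of the prefix of the tail equal to the run head
def pvRunLen (x : String) : List String → Nat
  | [] => 0
  | y :: ys => if y == x then 1 + pvRunLen x ys else 0

-- outer while of _max_run: peel one maximal run, keep the best length seen
-- (fuel = remaining list length, a totality guard only: it never runs out)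
def pvMaxRunLoop : Nat → Int → List String → Int
  | _, best, [] => best
  | 0, best, _ :: _ => best
  | fuel + 1, best, x :: xs =>
      pvMaxRunLoop fuel (max best (1 + (pvRunLen x xs : Int))) (xs.drop (pvRunLen x xs))

def count_candy_alt (board : List (List String)) (board_size : Int) (target_x : Int) (target_y : Int) (direction : Int) : Int :=
  let line :=
    if direction = 0 then
      (PySem.List.pyRange 0 board_size 1).map
        (fun i => PySem.List.pyGetD (PySem.List.pyGetD board i []) target_x "")
    else
      (PySem.List.pyRange 0 board_size 1).map
        (fun i => PySem.List.pyGetD (PySem.List.pyGetD board target_y []) i "")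
  pvMaxRunLoop line.length 1 line

-- ===== PRECONDITION & SPEC =====
-- Pre_ excludes exactly the inputs where Python A raises IndexError (an index off the board).
def Pre_count_candy (board : List (List String)) (board_size : Int) (target_x : Int) (target_y : Int) (direction : Int) : Prop :=
  if direction = 0 then
    board_size ≤ (board.length : Int) ∧
    ∀ row ∈ board.take board_size.toNat, PySem.Raise.InRange row.length target_x
  else
    0 < board_size →
      (PySem.Raise.InRange board.length target_y ∧
       board_size ≤ ((PySem.List.pyGetD board target_y []).length : Int))
instance (board : List (List String)) (board_size : Int) (target_x : Int) (target_y : Int) (direction : Int) : Decidable (Pre_count_candy board board_size target_x target_y direction) := by unfold Pre_count_candy; infer_instance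

def pvWitness_count_candy : List (List String) × Int × Int × Int × Int := ([["a", "b"], ["a", "b"]], 2, 0, 0, 0)

-- plain Python-style indexing (negative index counted from the end), written with List.getD
def pvNth {α : Type} (xs : List α) (t : Int) (d : α) : α :=
  xs.getD (t % xs.length).toNat d

-- the scanned line, read off the input directly (rows truncated to board_size)
def pvLineD (board : List (List String)) (board_size : Int) (target_x : Int) (target_y : Int) (direction : Int) : List String :=
  (if direction = 0 then board.map (pvNth · target_x "") else pvNth board target_y []).take board_size.toNat

-- D_ holds when the scanned line starts with empty-string candies and no candy run in it is
-- longer than that leading run: there A's recent_candy='' sentinel matches the first candy so A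
-- returns the leading run length plus one (e.g. 2 on [['']]), while B returns the true longest
-- run length, the intended value.
def D_count_candy (board : List (List String)) (board_size : Int) (target_x : Int) (target_y : Int) (direction : Int) : Prop :=
  let l := pvLineD board board_size target_x target_y direction
  l.getD 0 "x" = "" ∧ ∀ s ∈ l, ¬(List.replicate ((l.takeWhile (· == "")).length + 1) s).IsInfix l
instance (board : List (List String)) (board_size : Int) (target_x : Int) (target_y : Int) (direction : Int) : Decidable (D_count_candy board board_size target_x target_y direction) := by unfold D_count_candy; infer_instance

def Spec_count_candy (board : List (List String)) (board_size : Int) (target_x : Int) (target_y : Int) (direction : Int) (out : Int) : Prop := ¬ D_count_candy board board_size target_x target_y direction → out = count_candy_alt board board_size target_x target_y direction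
instance (board : List (List String)) (board_size : Int) (target_x : Int) (target_y : Int) (direction : Int) (out : Int) : Decidable (Spec_count_candy board board_size target_x target_y direction out) := by unfold Spec_count_candy; infer_instance

def pvDiffWitness_count_candy : List (List String) × Int × Int × Int × Int := ([[""]], 1, 0, 0, 0)
def pvDiffWitnessOut_count_candy : Int × Int := (2, 1)

-- ===== CLAIM (what is proved, stated in full; the proofs are below) =====
def Claim_unchanged_count_candy : Prop := ∀ (board : List (List String)) (board_size : Int) (target_x : Int) (target_y : Int) (direction : Int), Dom_count_candy board board_size target_x target_y direction → Pre_count_candy board board_size target_x target_y direction → Spec_count_candy board board_size target_x target_y direction (count_candy board board_size target_x target_y direction)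
def Claim_changed_count_candy : Prop := Dom_count_candy (pvDiffWitness_count_candy.1) (pvDiffWitness_count_candy.2.1) (pvDiffWitness_count_candy.2.2.1) (pvDiffWitness_count_candy.2.2.2.1) (pvDiffWitness_count_candy.2.2.2.2) ∧ Pre_count_candy (pvDiffWitness_count_candy.1) (pvDiffWitness_count_candy.2.1) (pvDiffWitness_count_candy.2.2.1) (pvDiffWitness_count_candy.2.2.2.1) (pvDiffWitness_count_candy.2.2.2.2) ∧ D_count_candy (pvDiffWitness_count_candy.1) (pvDiffWitness_count_candy.2.1) (pvDiffWitness_count_candy.2.2.1) (pvDiffWitness_count_candy.2.2.2.1) (pvDiffWitness_count_candy.2.2.2.2) ∧ count_candy (pvDiffWitness_count_candy.1) (pvDiffWitness_count_candy.2.1) (pvDiffWitness_count_candy.2.2.1) (pvDiffWitness_count_candy.2.2.2.1) (pvDiffWitness_count_candy.2.2.2.2) = pvDiffWitnessOut_count_candy.1 ∧ count_candy_alt (pvDiffWitness_count_candy.1) (pvDiffWitness_count_candy.2.1) (pvDiffWitness_count_candy.2.2.1) (pvDiffWitness_count_candy.2.2.2.1) (pvDiffWitness_count_candy.2.2.2.2)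 = pvDiffWitnessOut_count_candy.2 ∧ pvDiffWitnessOut_count_candy.1 ≠ pvDiffWitnessOut_count_candy.2
def Claim_exact_count_candy : Prop := ∀ (board : List (List String)) (board_size : Int) (target_x : Int) (target_y : Int) (direction : Int), Dom_count_candy board board_size target_x target_y direction → Pre_count_candy board board_size target_x target_y direction → D_count_candy board board_size target_x target_y direction → count_candy board board_size target_x target_y direction ≠ count_candy_alt board board_size target_x target_y direction

-- ===== LEMMAS AND PROOFS =====

-- a constant segment of length m inside l (proof-side name for the condition inlined in D_)
def pvHasRun (l : List String) (m : Nat) : Prop :=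
  ∃ i < l.length, i + m ≤ l.length ∧ ∀ j < m, l.getD (i + j) "" = l.getD i ""

-- max-run of the whole remaining line (pure form of pvMaxRunLoop, proof helper)
def pvM : List String → Int
  | [] => 1
  | x :: xs => max (1 + (pvRunLen x xs : Int)) (pvM (xs.drop (pvRunLen x xs)))
  termination_by l => l.length
  decreasing_by simp

theorem pvM_nil : pvM [] = 1 := by rw [pvM.eq_def]

theorem pvM_cons (x : String) (xs : List String) :
    pvM (x :: xs) = max (1 + (pvRunLen x xs : Int)) (pvM (xs.drop (pvRunLen x xs))) := by
  rw [pvM.eq_def]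

-- the value A's loop still reaches from state (·, rc, c)
def pvG (rc : String) (c : Int) : List String → Int
  | [] => c
  | ch :: rest => if rc == ch then pvG rc (c + 1) rest else max c (pvG ch 1 rest)

theorem pvG_ge (l : List String) : ∀ (rc : String) (c : Int), c ≤ pvG rc c l := by
  induction l with
  | nil => intro rc c; simp [pvG]
  | cons ch rest ih =>
      intro rc c
      simp only [pvG]
      split
      · exact le_trans (by omega) (ih rc (c + 1))
      · exact le_max_left _ _

theorem foldl_pvStep (l : List String) : ∀ (mc : Int) (rc : String) (c : Int), c ≤ mc →
    (l.foldl pvStep (mc, rc, c)).1 = max mc (pvG rc c l) := by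
  induction l with
  | nil => intro mc rc c h; simp [pvG]; omega
  | cons ch rest ih =>
      intro mc rc c h
      simp only [List.foldl_cons, pvStep, pvG]
      split
      · rw [ih (max mc (c + 1)) rc (c + 1) (by omega)]
        have := pvG_ge rest rc (c + 1)
        omega
      · rw [ih (max mc 1) ch 1 (by omega)]
        have := pvG_ge rest ch 1
        omega

theorem pvM_ge_one (l : List String) : 1 ≤ pvM l := by
  cases l with
  | nil => rw [pvM_nil]
  | cons x xs =>
      rw [pvM_cons]
      have : (0 : Int) ≤ (pvRunLen x xs : Int) := by positivity
      omega

theorem pvG_runs (l : List String) : ∀ (ch : String) (c : Int), 1 ≤ c →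
    pvG ch c l = max (c + (pvRunLen ch l : Int)) (pvM (l.drop (pvRunLen ch l))) := by
  induction l with
  | nil => intro ch c h; simp [pvG, pvRunLen, pvM_nil]; omega
  | cons y ys ih =>
      intro ch c h
      by_cases hy : y = ch
      · subst hy
        simp only [pvG, pvRunLen, beq_self_eq_true, if_true]
        rw [ih y (c + 1) (by omega)]
        rw [show ((1 : Nat) + pvRunLen y ys) = pvRunLen y ys + 1 from Nat.add_comm _ _]
        simp only [List.drop_succ_cons]
        push_cast
        omega
      · have h1 : (y == ch) = false := by simp [hy]
        have h2 : (ch == y) = false := by simp [Ne.symm hy]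
        rw [show pvG ch c (y :: ys) = max c (pvG y 1 ys) by simp [pvG, h2],
          show pvRunLen ch (y :: ys) = 0 by simp [pvRunLen, h1]]
        rw [ih y 1 (by omega), List.drop_zero, pvM_cons]
        simp only [Nat.cast_zero]
        omega

theorem pvMaxRunLoop_eq : ∀ (fuel : Nat) (l : List String), l.length ≤ fuel → ∀ (best : Int), 1 ≤ best →
    pvMaxRunLoop fuel best l = max best (pvM l) := by
  intro fuel
  induction fuel with
  | zero =>
      intro l hl best h
      have : l = [] := by cases l <;> simp_all
      subst this
      rw [pvMaxRunLoop, pvM_nil]; omega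
  | succ n ih =>
      intro l hl best h
      cases l with
      | nil => rw [pvMaxRunLoop, pvM_nil]; omega
      | cons x xs =>
          rw [pvMaxRunLoop, pvM_cons,
            ih (xs.drop (pvRunLen x xs)) (by simp at hl ⊢; omega) _ (by omega)]
          have := pvM_ge_one (xs.drop (pvRunLen x xs))
          omega

-- run-length basics
theorem pvRunLen_le (x : String) (xs : List String) : pvRunLen x xs ≤ xs.length := by
  induction xs with
  | nil => simp [pvRunLen]
  | cons y ys ih => simp only [pvRunLen, List.length_cons]; split <;> omega

theorem pvRunLen_prefix (x : String) (xs : List String) :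
    ∀ j, j < 1 + pvRunLen x xs → (x :: xs).getD j "" = x := by
  induction xs generalizing x with
  | nil =>
      intro j hj
      simp only [pvRunLen] at hj
      have hj0 : j = 0 := by omega
      subst hj0
      simp
  | cons y ys ih =>
      intro j hj
      cases j with
      | zero => simp
      | succ j =>
          simp only [pvRunLen] at hj
          by_cases hy : (y == x) = true
          · have hyx : y = x := by simpa using hy
            subst hyx
            simp only [hy, if_true] at hj
            have := ih y j (by omega)
            simpa using this
          · simp [hy] at hj

theorem pvRunLen_stop (x : String) (xs : List String) :
    pvRunLen x xs < xs.length → xs.getD (pvRunLen x xs) "" ≠ x := by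
  induction xs generalizing x with
  | nil => simp [pvRunLen]
  | cons y ys ih =>
      intro hlt
      by_cases hy : (y == x) = true
      · have hyx : y = x := by simpa using hy
        subst hyx
        simp only [pvRunLen, hy, if_true] at hlt ⊢
        rw [show (1 + pvRunLen y ys) = pvRunLen y ys + 1 from Nat.add_comm _ _]
        simp only [List.getD_cons_succ]
        exact ih y (by simp at hlt; omega)
      · simp only [pvRunLen, hy]
        simpa using hy

theorem pvTakeWhile_len (l : List String) :
    (l.takeWhile (fun s => s == "")).length = pvRunLen "" l := by
  induction l with
  | nil => simp [pvRunLen]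
  | cons y ys ih =>
      simp only [List.takeWhile, pvRunLen]
      by_cases hy : (y == "") = true
      · simp [hy, ih, Nat.add_comm]
      · simp [hy]

theorem getD_drop (l : List String) (d t : Nat) :
    (l.drop d).getD t "" = l.getD (d + t) "" := by
  simp [List.getD_eq_getElem?_getD, List.getElem?_drop]

-- the max-run characterisation: a constant m-segment exists iff m ≤ pvM
theorem pvHasRun_iff : ∀ (n : Nat) (l : List String), l.length ≤ n → ∀ m : Nat, 2 ≤ m →
    (pvHasRun l m ↔ (m : Int) ≤ pvM l) := by
  intro n
  induction n with
  | zero =>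
      intro l hl m hm
      have : l = [] := by cases l <;> simp_all
      subst this
      simp only [pvHasRun, pvM_nil]
      constructor
      · rintro ⟨i, hi, -⟩; simp at hi
      · intro h; omega
  | succ n ih =>
      intro l hl m hm
      cases l with
      | nil =>
          simp only [pvHasRun, pvM_nil]
          constructor
          · rintro ⟨i, hi, -⟩; simp at hi
          · intro h; omega
      | cons x xs =>
          have hkx := pvRunLen_le x xs
          have hrl : (xs.drop (pvRunLen x xs)).length = xs.length - pvRunLen x xs := by simp
          rw [pvM_cons]
          have ihr := ih (xs.drop (pvRunLen x xs)) (by simp at hl ⊢; omega) m hm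
          constructor
          · rintro ⟨i, hi, him, hconst⟩
            by_cases hseg : i + m ≤ 1 + pvRunLen x xs
            · have : (m : Int) ≤ 1 + (pvRunLen x xs : Int) := by omega
              omega
            · by_cases hil : i ≤ pvRunLen x xs
              · -- the segment crosses the end of the first run: contradiction
                exfalso
                have hjlt : 1 + pvRunLen x xs - i < m := by omega
                have h1 : (x :: xs).getD (i + (1 + pvRunLen x xs - i)) "" = (x :: xs).getD i "" :=
                  hconst _ hjlt
                have h2 : (x :: xs).getD i "" = x := pvRunLen_prefix x xs i (by omega)
                have hidx : i + (1 + pvRunLen x xs - i) = pvRunLen x xs + 1 := by omega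
                rw [hidx, h2] at h1
                simp only [List.getD_cons_succ] at h1
                have hklen : pvRunLen x xs < xs.length := by
                  simp at him; omega
                exact pvRunLen_stop x xs hklen h1
              · -- the segment lies entirely after the first run
                have hm' : (m : Int) ≤ pvM (xs.drop (pvRunLen x xs)) := by
                  apply ihr.mp
                  refine ⟨i - (1 + pvRunLen x xs), by simp at him ⊢; omega, by simp at him ⊢; omega, ?_⟩
                  intro j hj
                  have g : ∀ t, (xs.drop (pvRunLen x xs)).getD t "" =
                      (x :: xs).getD (1 + pvRunLen x xs + t) "" := by
                    intro t
                    rw [getD_drop,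
                      show 1 + pvRunLen x xs + t = (pvRunLen x xs + t) + 1 by omega]
                    simp
                  rw [g, g,
                    show 1 + pvRunLen x xs + (i - (1 + pvRunLen x xs) + j) = i + j by omega,
                    show 1 + pvRunLen x xs + (i - (1 + pvRunLen x xs)) = i by omega]
                  exact hconst j hj
                omega
          · intro hmax
            by_cases hmr : m ≤ 1 + pvRunLen x xs
            · refine ⟨0, by simp, by simp; omega, ?_⟩
              intro j hj
              simp only [Nat.zero_add]
              rw [pvRunLen_prefix x xs j (by omega), pvRunLen_prefix x xs 0 (by omega)]
            · have : (m : Int) ≤ pvM (xs.drop (pvRunLen x xs)) := by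
                have : ¬ ((m : Int) ≤ 1 + (pvRunLen x xs : Int)) := by omega
                omega
              obtain ⟨i, hi, him, hconst⟩ := ihr.mpr this
              rw [hrl] at hi him
              refine ⟨pvRunLen x xs + 1 + i, by simp; omega, by simp; omega, ?_⟩
              intro j hj
              have g : ∀ t, (x :: xs).getD (pvRunLen x xs + 1 + t) "" =
                  (xs.drop (pvRunLen x xs)).getD t "" := by
                intro t
                rw [getD_drop]
                rw [show pvRunLen x xs + 1 + t = (pvRunLen x xs + t) + 1 by omega]
                simp
              rw [show pvRunLen x xs + 1 + i + j = pvRunLen x xs + 1 + (i + j) by omega,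
                g (i + j), g i]
              exact hconst j hj

-- proof-side name for the body of D_count_candy
def pvDL (l : List String) : Prop :=
  l.getD 0 "x" = "" ∧ ∀ s ∈ l, ¬(List.replicate ((l.takeWhile (· == "")).length + 1) s).IsInfix l

theorem D_iff (board : List (List String)) (board_size : Int) (target_x : Int) (target_y : Int) (direction : Int) :
    D_count_candy board board_size target_x target_y direction ↔
      pvDL (pvLineD board board_size target_x target_y direction) := Iff.rfl

-- a replicate-m infix is the same thing as a constant m-segment
theorem rep_infix_iff (l : List String) (m : Nat) (hm : 1 ≤ m) :
    (∃ s ∈ l, (List.replicate m s).IsInfix l) ↔ pvHasRun l m := by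
  constructor
  · rintro ⟨s, hs, u, v, huv⟩
    refine ⟨u.length, ?_, ?_, ?_⟩
    · rw [← huv]; simp; omega
    · rw [← huv]; simp
    · intro j hj
      have g : ∀ t, t < m → l.getD (u.length + t) "" = s := by
        intro t ht
        rw [← huv, List.getD_eq_getElem?_getD, List.append_assoc,
          List.getElem?_append_right (by omega)]
        simp [List.getElem?_append, List.length_replicate, ht]
      have g0 := g 0 (by omega)
      rw [Nat.add_zero] at g0
      rw [g j hj, g0]
  · rintro ⟨i, hi, him, hc⟩
    have hgd : l.getD i "" = l[i] := by
      rw [List.getD_eq_getElem?_getD]; simp [List.getElem?_eq_getElem hi]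
    refine ⟨l.getD i "", by rw [hgd]; exact List.getElem_mem hi, l.take i, l.drop (i + m), ?_⟩
    have hseg : (l.drop i).take m = List.replicate m (l.getD i "") := by
      apply List.eq_replicate_iff.mpr
      refine ⟨by simp; omega, ?_⟩
      intro b hb
      obtain ⟨j, hjlt, hjb⟩ := List.mem_iff_getElem.mp hb
      have hjm : j < m := by simp at hjlt; omega
      have : b = l.getD (i + j) "" := by
        rw [← hjb, List.getD_eq_getElem?_getD]
        simp [List.getElem?_eq_getElem (show i + j < l.length by omega)]
      rw [this, hc j hjm]
    rw [← hseg, List.append_assoc,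
      show l.drop (i + m) = (l.drop i).drop m by rw [List.drop_drop],
      List.take_append_drop]
    exact List.take_append_drop i l

-- A's answer on a line l, as max 1 (pvG "" 1 l); B's is max 1 (pvM l)
theorem core_eq (l : List String) (h : ¬ pvDL l) :
    max 1 (pvG "" 1 l) = max 1 (pvM l) := by
  cases l with
  | nil => simp [pvG, pvM_nil]
  | cons ch rest =>
      by_cases hch : ch = ""
      · subst hch
        have hr : ((("" : String) :: rest).takeWhile (fun c => c == "")).length =
            1 + pvRunLen "" rest := by
          rw [pvTakeWhile_len]; simp [pvRunLen]
        have hex : ∃ s ∈ ("" : String) :: rest,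
            (List.replicate (((("" : String) :: rest).takeWhile (fun c => c == "")).length + 1)
              s).IsInfix (("" : String) :: rest) := by
          by_contra hno
          exact h ⟨by simp, fun s hs hi => hno ⟨s, hs, hi⟩⟩
        rw [hr] at hex
        have hM : ((1 + pvRunLen "" rest + 1 : Nat) : Int) ≤ pvM (("" : String) :: rest) :=
          ((rep_infix_iff _ _ (by omega)).trans
            (pvHasRun_iff (("" : String) :: rest).length _ (le_refl _) _ (by omega))).mp hex
        rw [pvM_cons] at hM
        rw [show pvG "" 1 (("" : String) :: rest) = pvG "" 2 rest by simp [pvG],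
          pvG_runs rest "" 2 (by omega), pvM_cons]
        push_cast at hM ⊢
        omega
      · have hbeq : (("" : String) == ch) = false := by
          simp only [beq_eq_false_iff_ne]; exact fun e => hch e.symm
        rw [show pvG "" 1 (ch :: rest) = max 1 (pvG ch 1 rest) by simp [pvG, hbeq]]
        rw [pvG_runs rest ch 1 (le_refl _), pvM_cons]
        have h0 : (0 : Int) ≤ (pvRunLen ch rest : Int) := by positivity
        have h2 := pvM_ge_one (rest.drop (pvRunLen ch rest))
        omega

theorem core_ne (l : List String) (h : pvDL l) :
    max 1 (pvG "" 1 l) ≠ max 1 (pvM l) := by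
  obtain ⟨h0, hno⟩ := h
  cases l with
  | nil => simp at h0
  | cons ch rest =>
      have hch : ch = "" := by simpa using h0
      subst hch
      have hr : ((("" : String) :: rest).takeWhile (fun c => c == "")).length =
          1 + pvRunLen "" rest := by
        rw [pvTakeWhile_len]; simp [pvRunLen]
      have hnex : ¬ ∃ s ∈ ("" : String) :: rest,
          (List.replicate (1 + pvRunLen "" rest + 1) s).IsInfix (("" : String) :: rest) := by
        rintro ⟨s, hs, hi⟩
        rw [← hr] at hi
        exact hno s hs hi
      have hM : ¬ ((1 + pvRunLen "" rest + 1 : Nat) : Int) ≤ pvM (("" : String) :: rest) :=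
        fun hle => hnex (((rep_infix_iff _ _ (by omega)).trans
          (pvHasRun_iff (("" : String) :: rest).length _ (le_refl _) _ (by omega))).mpr hle)
      have h1 := pvM_ge_one (rest.drop (pvRunLen "" rest))
      rw [pvM_cons] at hM
      rw [show pvG "" 1 (("" : String) :: rest) = pvG "" 2 rest by simp [pvG],
        pvG_runs rest "" 2 (by omega), pvM_cons]
      push_cast at hM ⊢
      omega

-- fold with the element read inside the body = fold of pvStep over the materialized line
theorem foldl_comp (f : Int → String) (l : List Int) (s : Int × String × Int) :
    l.foldl (fun s i => pvStep s (f i)) s = (l.map f).foldl pvStep s := by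
  rw [List.foldl_map]

-- both ports reduced to the same scanned line
theorem portA_eq (l : List Int) (f : Int → String) :
    ((l.map f).foldl pvStep ((1 : Int), ("" : String), (1 : Int))).1 =
      max 1 (pvG "" 1 (l.map f)) :=
  foldl_pvStep _ 1 "" 1 (le_refl _)

theorem portB_eq (l : List String) : pvMaxRunLoop l.length 1 l = max 1 (pvM l) :=
  pvMaxRunLoop_eq l.length l (le_refl _) 1 (le_refl _)

-- under an in-range index, Python indexing (pyGetD) agrees with pvNth
theorem pyGetD_inrange {α : Type} (xs : List α) (t : Int) (d : α)
    (h : PySem.Raise.InRange xs.length t) :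
    PySem.List.pyGetD xs t d = pvNth xs t d := by
  unfold pvNth
  unfold PySem.Raise.InRange at h
  by_cases ht : t < 0
  · rw [show t = -(((-t).toNat : Nat) : Int) by omega,
      PySem.List.pyGetD_neg_natCast xs (-t).toNat d (by omega) (by omega)]
    have hlt : xs.length - (-t).toNat < xs.length := by omega
    rw [List.getD_eq_getElem?_getD,
      show (-(((-t).toNat : Nat) : Int)) =
        ((xs.length : Int) - (((-t).toNat : Nat) : Int)) + (xs.length : Int) * (-1) by ring,
      Int.add_mul_emod_self_left,
      Int.emod_eq_of_lt (by omega) (by omega),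
      show ((xs.length : Int) - (((-t).toNat : Nat) : Int)).toNat = xs.length - (-t).toNat by
        omega]
    simp [List.getElem?_eq_getElem hlt]
  · rw [PySem.List.pyGetD_eq_getElem xs d (by omega) (by omega)]
    have hlt : t.toNat < xs.length := by omega
    rw [List.getD_eq_getElem?_getD,
      Int.emod_eq_of_lt (by omega) (by omega)]
    simp [List.getElem?_eq_getElem hlt]

-- under Pre_, the port-side line equals the input-side line pvLineD
theorem line_eq_dir0 (board : List (List String)) (board_size target_x : Int)
    (hbs : board_size ≤ (board.length : Int))
    (hrows : ∀ row ∈ board.take board_size.toNat, PySem.Raise.InRange row.length target_x) :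
    (PySem.List.pyRange 0 board_size 1).map
        (fun i => PySem.List.pyGetD (PySem.List.pyGetD board i []) target_x "") =
      (board.map (fun row => pvNth row target_x "")).take board_size.toNat := by
  rw [← List.map_take, PySem.List.pyRange_one]
  simp only [Int.sub_zero, List.map_map]
  apply List.ext_getElem
  · simp; omega
  · intro k h1 h2
    simp only [List.getElem_map, List.getElem_range, Function.comp_apply, List.getElem_take]
    simp only [List.length_map, List.length_take] at h2
    have hk : k < board.length := by omega
    have hkbs : k < board_size.toNat := by omega
    have hkt : k < (board.take board_size.toNat).length := by
      simp only [List.length_take]; omega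
    have hmem : board[k] ∈ board.take board_size.toNat := by
      have h3 := List.getElem_mem hkt
      rwa [List.getElem_take] at h3
    rw [show ((0 : Int) + (k : Int)) = ((k : Nat) : Int) by omega, PySem.List.pyGetD_natCast]
    rw [show board.getD k [] = board[k] by
      rw [List.getD_eq_getElem?_getD]; simp [List.getElem?_eq_getElem hk]]
    exact pyGetD_inrange board[k] target_x "" (hrows _ hmem)

theorem line_eq_dir1 (board : List (List String)) (board_size target_y : Int)
    (hpre : 0 < board_size →
      (PySem.Raise.InRange board.length target_y ∧
       board_size ≤ ((PySem.List.pyGetD board target_y []).length : Int))) :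
    (PySem.List.pyRange 0 board_size 1).map
        (fun i => PySem.List.pyGetD (PySem.List.pyGetD board target_y []) i "") =
      (pvNth board target_y []).take board_size.toNat := by
  by_cases hbs : 0 < board_size
  · obtain ⟨hin, hlen⟩ := hpre hbs
    rw [← pyGetD_inrange board target_y [] hin]
    rw [PySem.List.pyRange_one]
    simp only [Int.sub_zero, List.map_map]
    apply List.ext_getElem
    · simp; omega
    · intro k h1 h2
      simp only [List.getElem_map, List.getElem_range, Function.comp_apply, List.getElem_take]
      rw [show ((0 : Int) + (k : Int)) = ((k : Nat) : Int) by omega, PySem.List.pyGetD_natCast]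
      have hk : k < (PySem.List.pyGetD board target_y []).length := by simp at h2; omega
      simp [List.getD_eq_getElem?_getD, hk]
  · rw [PySem.List.pyRange_one_eq_nil (by omega),
      show board_size.toNat = 0 by omega]
    simp

-- ===== VERDICT (by name: the statement is the Claim_ definition above) =====
theorem count_candy_spec : Claim_unchanged_count_candy := by
  intro board board_size target_x target_y direction _ hpre
  unfold Spec_count_candy
  rw [D_iff]
  intro hnD
  unfold count_candy count_candy_alt
  unfold Pre_count_candy at hpre
  by_cases hdir : direction = 0
  · simp only [hdir, if_true] at *
    rw [foldl_comp (fun i => PySem.List.pyGetD (PySem.List.pyGetD board i []) target_x ""),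
      portA_eq, portB_eq, line_eq_dir0 board board_size target_x hpre.1 hpre.2]
    exact core_eq _ (by simpa [pvLineD] using hnD)
  · simp only [hdir, if_false] at hpre ⊢
    rw [foldl_comp (fun i => PySem.List.pyGetD (PySem.List.pyGetD board target_y []) i ""),
      portA_eq, portB_eq, line_eq_dir1 board board_size target_y hpre]
    exact core_eq _ (by unfold pvLineD at hnD; rw [if_neg hdir] at hnD; exact hnD)

theorem count_candy_changed : Claim_changed_count_candy := by unfold Claim_changed_count_candy; decide

theorem count_candy_tight : Claim_exact_count_candy := by
  intro board board_size target_x target_y direction _ hpre hD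
  rw [D_iff] at hD
  unfold count_candy count_candy_alt
  unfold Pre_count_candy at hpre
  by_cases hdir : direction = 0
  · simp only [hdir, if_true] at *
    rw [foldl_comp (fun i => PySem.List.pyGetD (PySem.List.pyGetD board i []) target_x ""),
      portA_eq, portB_eq, line_eq_dir0 board board_size target_x hpre.1 hpre.2]
    exact core_ne _ (by simpa [pvLineD] using hD)
  · simp only [hdir, if_false] at hpre ⊢
    rw [foldl_comp (fun i => PySem.List.pyGetD (PySem.List.pyGetD board target_y []) i ""),
      portA_eq, portB_eq, line_eq_dir1 board board_size target_y hpre]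
    exact core_ne _ (by unfold pvLineD at hD; rw [if_neg hdir] at hD; exact hD)
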